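-- pv_equiv track=rewrite | github.com/DrorPezo/LLM4BGP | Datasets/datasets_preparation.py | map_as_class
-- ===== SOURCE A (Python) =====
-- def map_as_class(as_type: str) -> str:
--     key_raw = as_type.strip().lower()
--
--     if key_raw.replace('-', ' ').replace('_', ' ').replace('/', ' ').strip() == "network services":
--         return "Enterprise"
--
--     if key_raw.replace('-', ' ').replace('_', ' ').replace('/', ' ').strip() == "non profit":
--         return "Enterprise"
--
--     if key_raw.replace('-', ' ').replace('_', ' ').replace('/', ' ').strip() == "route server":
--         return "Enterprise"
--
--     if key_raw.replace('-', ' ').replace('_', ' ').replace('/', ' ').strip() == "route collector":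
--         return "Enterprise"
--
--     key = (
--         key_raw.replace('-', ' ')
--                .replace('_', ' ')
--                .replace('/', ' ')
--                .replace('\\', ' ')
--     )
--     key_parts = {part for part in key.split() if part}
--
--     enterprise_keys = {
--         "enterprise", "education", "research", "educationresearch",
--         "edu", "school", "university", "academic",
--         "networkservices", "nonprofit", "government",
--         "notdisclosed", "routeserver", "routecollector"
--     }
--
--     transit_keys = {
--         "cable", "dsl", "isp", "nsp", "transit", "access",
--         "cabledsl", "cabledslisp", "cableisp"
--     }
--
--     content_keys = {"content", "cdn", "ott"}
--
--     if key_parts & enterprise_keys: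
--         return "Enterprise"
--     if key_parts & transit_keys:
--         return "Transit / Access"
--     if key_parts & content_keys:
--         return "Content"
--
--     raise ValueError(f"Unknown AS type: {as_type!r}")
-- ===== SOURCE B (Python) =====
-- # B: a single character-level scan tokenizes and classifies at once (min-rank accumulator),
-- # replacing A's chained replace()s, split() and three set intersections. Objective: simpler/alternative.
-- _PHRASES = ("network services", "non profit", "route server", "route collector")
-- _LABELS = ("Enterprise", "Transit / Access", "Content")
--
--
-- def _rank(tok):
--     if tok in ("enterprise", "education", "research", "educationresearch", "edu",
--                "school", "university", "academic", "networkservices", "nonprofit",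
--                "government", "notdisclosed", "routeserver", "routecollector"):
--         return 0
--     if tok in ("cable", "dsl", "isp", "nsp", "transit", "access",
--                "cabledsl", "cabledslisp", "cableisp"):
--         return 1
--     if tok in ("content", "cdn", "ott"):
--         return 2
--     return 3
--
--
-- def map_as_class(as_type: str) -> str:
--     key_raw = as_type.strip().lower()
--     if ''.join(' ' if c in '-_/' else c for c in key_raw).strip() in _PHRASES:
--         return "Enterprise"
--     best, tok = 3, []
--     for c in key_raw + ' ':  # trailing sentinel flushes the last token
--         if c.isspace() or c in '-_/\\':
--             if tok:
--                 best = min(best, _rank(''.join(tok)))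
--                 tok = []
--         else:
--             tok.append(c)
--     if best == 3:
--         raise ValueError(f"Unknown AS type: {as_type!r}")
--     return _LABELS[best]
-- ===== Notes on version B (the rewrite author's own statement) =====
-- stated objective: alternative
-- what changed: Replaces A's staged pipeline (four replace() passes building intermediate strings, split(), a set of tokens, three set intersections tried in priority order) by a single character-level scan that tokenizes on separator characters and keeps only the minimum category rank (0 Enterprise, 1 Transit, 2 Content) of any token seen, mapping the final rank to its label.
import Mathlib
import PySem

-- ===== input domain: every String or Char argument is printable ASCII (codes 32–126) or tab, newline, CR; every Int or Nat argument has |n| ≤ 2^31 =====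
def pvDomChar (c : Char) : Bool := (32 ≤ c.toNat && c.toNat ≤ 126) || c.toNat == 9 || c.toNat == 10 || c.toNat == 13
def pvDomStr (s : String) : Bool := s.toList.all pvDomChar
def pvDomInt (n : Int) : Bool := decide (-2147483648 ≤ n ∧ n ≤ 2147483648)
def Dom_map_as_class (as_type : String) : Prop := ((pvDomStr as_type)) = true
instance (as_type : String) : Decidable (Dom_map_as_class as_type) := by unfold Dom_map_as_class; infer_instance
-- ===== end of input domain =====

-- B replaces A's chained replace()/split() passes and three set intersections by ONE character-level
-- scan that tokenizes and keeps the minimum category rank (objective: alternative decomposition).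
-- Shared keyword literals (both Python versions spell out the same lists).
def entKeyList : List String :=
  ["enterprise", "education", "research", "educationresearch",
   "edu", "school", "university", "academic",
   "networkservices", "nonprofit", "government",
   "notdisclosed", "routeserver", "routecollector"]

def transitKeyList : List String :=
  ["cable", "dsl", "isp", "nsp", "transit", "access",
   "cabledsl", "cabledslisp", "cableisp"]

def contentKeyList : List String := ["content", "cdn", "ott"]

-- ===== PORT A =====
def map_as_class (as_type : String) : String :=
  let key_raw := PySem.Str.lower (PySem.Str.strip as_type)
  if PySem.Str.strip (PySem.Str.replace (PySem.Str.replace (PySem.Str.replace key_raw "-" " ") "_" " ") "/" " ") = "network services" then "Enterprise"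
  else if PySem.Str.strip (PySem.Str.replace (PySem.Str.replace (PySem.Str.replace key_raw "-" " ") "_" " ") "/" " ") = "non profit" then "Enterprise"
  else if PySem.Str.strip (PySem.Str.replace (PySem.Str.replace (PySem.Str.replace key_raw "-" " ") "_" " ") "/" " ") = "route server" then "Enterprise"
  else if PySem.Str.strip (PySem.Str.replace (PySem.Str.replace (PySem.Str.replace key_raw "-" " ") "_" " ") "/" " ") = "route collector" then "Enterprise"
  else
    let key := PySem.Str.replace (PySem.Str.replace (PySem.Str.replace (PySem.Str.replace key_raw "-" " ") "_" " ") "/" " ") "\\" " "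
    let key_parts : PySem.Set String := PySem.Set.ofList ((PySem.Str.split₀ key).filter (fun p => p ≠ ""))
    if PySem.Set.inter key_parts (PySem.Set.ofList entKeyList) ≠ [] then "Enterprise"
    else if PySem.Set.inter key_parts (PySem.Set.ofList transitKeyList) ≠ [] then "Transit / Access"
    else if PySem.Set.inter key_parts (PySem.Set.ofList contentKeyList) ≠ [] then "Content"
    else ""  -- Python raises ValueError here; excluded by Pre_map_as_class

-- ===== PORT B =====
-- helper _rank of Source B: category rank of one token (0 Enterprise, 1 Transit, 2 Content, 3 unknown)
def rankOf (tok : String) : Nat :=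
  if tok ∈ entKeyList then 0
  else if tok ∈ transitKeyList then 1
  else if tok ∈ contentKeyList then 2
  else 3

def phraseList : List String := ["network services", "non profit", "route server", "route collector"]

-- one step of Source B's scanning loop: state = (best rank so far, current token chars)
def stepB (s : Nat × List Char) (c : Char) : Nat × List Char :=
  if PySem.Chars.isspace c = true ∨ c = '-' ∨ c = '_' ∨ c = '/' ∨ c = '\\' then
    if s.2 ≠ [] then (min s.1 (rankOf (String.ofList s.2)), []) else s
  else (s.1, s.2 ++ [c])

def map_as_class_alt (as_type : String) : String :=
  let key_raw := PySem.Str.lower (PySem.Str.strip as_type)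
  if PySem.Str.strip (String.ofList (key_raw.toList.map (fun c => if c = '-' ∨ c = '_' ∨ c = '/' then ' ' else c))) ∈ phraseList then "Enterprise"
  else
    let best := ((key_raw.toList ++ [' ']).foldl stepB (3, [])).1  -- trailing sentinel ' ' flushes the last token
    if best = 3 then ""  -- Python raises ValueError here; excluded by Pre_map_as_class
    else ["Enterprise", "Transit / Access", "Content"].getD best ""

-- ===== PRECONDITION & SPEC =====
-- Pre_: exactly the inputs on which Python A returns (A raises ValueError when neither the normalized
-- whole string is one of the four special phrases nor any token is a known keyword).
def Pre_map_as_class (as_type : String) : Prop :=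
  (PySem.Str.strip (PySem.Str.replace (PySem.Str.replace (PySem.Str.replace (PySem.Str.lower (PySem.Str.strip as_type)) "-" " ") "_" " ") "/" " ") = "network services"
   ∨ PySem.Str.strip (PySem.Str.replace (PySem.Str.replace (PySem.Str.replace (PySem.Str.lower (PySem.Str.strip as_type)) "-" " ") "_" " ") "/" " ") = "non profit"
   ∨ PySem.Str.strip (PySem.Str.replace (PySem.Str.replace (PySem.Str.replace (PySem.Str.lower (PySem.Str.strip as_type)) "-" " ") "_" " ") "/" " ") = "route server"
   ∨ PySem.Str.strip (PySem.Str.replace (PySem.Str.replace (PySem.Str.replace (PySem.Str.lower (PySem.Str.strip as_type)) "-" " ") "_" " ") "/" " ") = "route collector")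
  ∨ ∃ t ∈ PySem.Str.split₀ (PySem.Str.replace (PySem.Str.replace (PySem.Str.replace (PySem.Str.replace (PySem.Str.lower (PySem.Str.strip as_type)) "-" " ") "_" " ") "/" " ") "\\" " "),
      t ∈ entKeyList ++ transitKeyList ++ contentKeyList
instance (as_type : String) : Decidable (Pre_map_as_class as_type) := by unfold Pre_map_as_class; infer_instance

def pvWitness_map_as_class : String := "Cable/DSL/ISP"

def Spec_map_as_class (as_type : String) (out : String) : Prop := out = map_as_class_alt as_type
instance (as_type : String) (out : String) : Decidable (Spec_map_as_class as_type out) := by unfold Spec_map_as_class; infer_instance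

-- ===== CLAIM (what is proved, stated in full; the proofs are below) =====
def Claim_equal_map_as_class : Prop := ∀ (as_type : String), Dom_map_as_class as_type → Pre_map_as_class as_type → Spec_map_as_class as_type (map_as_class as_type)

-- ===== LEMMAS AND PROOFS =====

-- the character maps A's replace chains amount to
def g3 (c : Char) : Char := if c = '-' ∨ c = '_' ∨ c = '/' then ' ' else c
def g4 (c : Char) : Char := if c = '-' ∨ c = '_' ∨ c = '/' ∨ c = '\\' then ' ' else c

lemma replace_go_single (o n' : Char) :
    ∀ (s acc : List Char) (fuel : Nat), s.length ≤ fuel →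
      PySem.Chars.replace.go [o] [n'] fuel s acc
        = acc.reverse ++ s.map (fun c => if c = o then n' else c) := by
  intro s
  induction s with
  | nil =>
    intro acc fuel _
    cases fuel <;> simp [PySem.Chars.replace.go]
  | cons c t ih =>
    intro acc fuel hf
    cases fuel with
    | zero => simp at hf
    | succ f =>
      by_cases hc : c = o
      · subst hc
        have : PySem.Chars.replace.go [c] [n'] (f+1) (c :: t) acc
            = PySem.Chars.replace.go [c] [n'] f t (n' :: acc) := by
          simp [PySem.Chars.replace.go, List.isPrefixOf]
        rw [this, ih (n' :: acc) f (by simpa using hf)]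
        simp
      · have : PySem.Chars.replace.go [o] [n'] (f+1) (c :: t) acc
            = PySem.Chars.replace.go [o] [n'] f t (c :: acc) := by
          simp only [PySem.Chars.replace.go, List.isPrefixOf]
          split
          · next h => exact absurd ((beq_iff_eq.mp (by simpa using h))).symm hc
          · rfl
        rw [this, ih (c :: acc) f (by simpa using hf)]
        simp [hc]

lemma replace_single (s : List Char) (o n' : Char) :
    PySem.Chars.replace s [o] [n'] = s.map (fun c => if c = o then n' else c) := by
  simp [PySem.Chars.replace, replace_go_single o n' s [] s.length le_rfl]

-- A's three replaces ('-','_','/') are the char map g3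
lemma norm3_toList (s : String) :
    (PySem.Str.replace (PySem.Str.replace (PySem.Str.replace s "-" " ") "_" " ") "/" " ").toList
      = s.toList.map g3 := by
  simp only [PySem.Str.toList_replace]
  have h1 : ("-" : String).toList = ['-'] := rfl
  have h2 : ("_" : String).toList = ['_'] := rfl
  have h3 : ("/" : String).toList = ['/'] := rfl
  have hsp : (" " : String).toList = [' '] := rfl
  rw [h1, h2, h3, hsp, replace_single, replace_single, replace_single, List.map_map, List.map_map]
  apply List.map_congr_left
  intro c _
  simp only [Function.comp, g3]
  by_cases hc1 : c = '-' <;> by_cases hc2 : c = '_' <;> by_cases hc3 : c = '/' <;>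
    simp_all <;> decide

-- …and the fourth replace ('\') makes it g4
lemma norm4_toList (s : String) :
    (PySem.Str.replace (PySem.Str.replace (PySem.Str.replace (PySem.Str.replace s "-" " ") "_" " ") "/" " ") "\\" " ").toList
      = s.toList.map g4 := by
  rw [PySem.Str.toList_replace, norm3_toList]
  have h4 : ("\\" : String).toList = ['\\'] := rfl
  have hsp : (" " : String).toList = [' '] := rfl
  rw [h4, hsp, replace_single, List.map_map]
  apply List.map_congr_left
  intro c _
  simp only [Function.comp, g3, g4]
  by_cases hc1 : c = '-' <;> by_cases hc2 : c = '_' <;> by_cases hc3 : c = '/' <;>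
    by_cases hc4 : c = '\\' <;> simp_all <;> decide

-- split₀.go's accumulator is a prefix
lemma split_go_acc (cs : List Char) :
    ∀ (cur : List Char) (acc : List (List Char)),
      PySem.Chars.split₀.go cs cur acc = acc.reverse ++ PySem.Chars.split₀.go cs cur [] := by
  induction cs with
  | nil =>
    intro cur acc
    by_cases h : cur.isEmpty <;> simp [PySem.Chars.split₀.go, h]
  | cons c t ih =>
    intro cur acc
    by_cases hs : PySem.Chars.isspace c
    · by_cases hc : cur.isEmpty
      · have e1 : PySem.Chars.split₀.go (c :: t) cur acc = PySem.Chars.split₀.go t [] acc := by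
          simp [PySem.Chars.split₀.go, hs, hc]
        have e2 : PySem.Chars.split₀.go (c :: t) cur [] = PySem.Chars.split₀.go t [] [] := by
          simp [PySem.Chars.split₀.go, hs, hc]
        rw [e1, e2, ih [] acc]
      · have e1 : PySem.Chars.split₀.go (c :: t) cur acc
            = PySem.Chars.split₀.go t [] (cur.reverse :: acc) := by
          simp [PySem.Chars.split₀.go, hs, hc]
        have e2 : PySem.Chars.split₀.go (c :: t) cur []
            = PySem.Chars.split₀.go t [] [cur.reverse] := by
          simp [PySem.Chars.split₀.go, hs, hc]
        rw [e1, e2, ih [] (cur.reverse :: acc), ih [] [cur.reverse]]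
        simp
    · have e1 : PySem.Chars.split₀.go (c :: t) cur acc
          = PySem.Chars.split₀.go t (c :: cur) acc := by
        simp [PySem.Chars.split₀.go, hs]
      have e2 : PySem.Chars.split₀.go (c :: t) cur []
          = PySem.Chars.split₀.go t (c :: cur) [] := by
        simp [PySem.Chars.split₀.go, hs]
      rw [e1, e2, ih (c :: cur) acc]

-- when the char is a separator, g4 maps it to whitespace; otherwise it is kept and is not whitespace
lemma sep_isspace (c : Char)
    (h : PySem.Chars.isspace c = true ∨ c = '-' ∨ c = '_' ∨ c = '/' ∨ c = '\\') :
    PySem.Chars.isspace (g4 c) = true := by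
  rcases h with h | h | h | h | h
  · by_cases h4 : c = '-' ∨ c = '_' ∨ c = '/' ∨ c = '\\'
    · simp [g4, h4]; decide
    · simpa [g4, h4] using h
  all_goals subst h; decide

lemma nonsep_g4 (c : Char)
    (h : ¬ (PySem.Chars.isspace c = true ∨ c = '-' ∨ c = '_' ∨ c = '/' ∨ c = '\\')) :
    g4 c = c ∧ PySem.Chars.isspace c = false := by
  push_neg at h
  obtain ⟨h0, h1, h2, h3, h4⟩ := h
  exact ⟨by simp [g4, h1, h2, h3, h4], by simpa using h0⟩

-- invariant: B's scan (with the sentinel) computes the min-rank fold over the tokens split₀ finds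
lemma scan_inv (cs : List Char) :
    ∀ (cur : List Char) (best : Nat),
      (List.foldl stepB (best, cur) (cs ++ [' '])).1
        = List.foldl (fun b t => min b (rankOf (String.ofList t))) best
            (PySem.Chars.split₀.go (cs.map g4) cur.reverse []) := by
  induction cs with
  | nil =>
    intro cur best
    have hsp : PySem.Chars.isspace ' ' = true := by decide
    by_cases hc : cur = []
    · subst hc
      simp [stepB, hsp, PySem.Chars.split₀.go]
    · have hre : cur.reverse.isEmpty = false := by
        simpa [List.isEmpty_iff] using hc
      simp [stepB, hsp, hc, PySem.Chars.split₀.go, hre]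
  | cons c t ih =>
    intro cur best
    by_cases hsep : PySem.Chars.isspace c = true ∨ c = '-' ∨ c = '_' ∨ c = '/' ∨ c = '\\'
    · have hg : PySem.Chars.isspace (g4 c) = true := sep_isspace c hsep
      by_cases hc : cur = []
      · subst hc
        have : stepB (best, []) c = (best, []) := by simp [stepB, hsep]
        simpa [this, PySem.Chars.split₀.go, hg] using ih [] best
      · have hre : cur.reverse.isEmpty = false := by
          simpa [List.isEmpty_iff] using hc
        have hstep : stepB (best, cur) c = (min best (rankOf (String.ofList cur)), []) := by
          simp [stepB, hsep, hc]
        calc (List.foldl stepB (best, cur) ((c :: t) ++ [' '])).1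
            = (List.foldl stepB (min best (rankOf (String.ofList cur)), []) (t ++ [' '])).1 := by
              simp [hstep]
          _ = List.foldl (fun b t => min b (rankOf (String.ofList t)))
                (min best (rankOf (String.ofList cur))) (PySem.Chars.split₀.go (t.map g4) [] []) :=
              ih [] _
          _ = List.foldl (fun b t => min b (rankOf (String.ofList t))) best
                (PySem.Chars.split₀.go (((c :: t).map g4)) cur.reverse []) := by
              simp only [List.map_cons, PySem.Chars.split₀.go, hg, hre,
                Bool.false_eq_true, if_false, if_true]
              rw [split_go_acc (t.map g4) [] (cur.reverse.reverse :: [])]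
              simp
    · obtain ⟨hg, hns⟩ := nonsep_g4 c hsep
      have hstep : stepB (best, cur) c = (best, cur ++ [c]) := by simp [stepB, hsep]
      calc (List.foldl stepB (best, cur) ((c :: t) ++ [' '])).1
          = (List.foldl stepB (best, cur ++ [c]) (t ++ [' '])).1 := by simp [hstep]
        _ = List.foldl (fun b t => min b (rankOf (String.ofList t))) best
              (PySem.Chars.split₀.go (t.map g4) ((cur ++ [c]).reverse) []) := ih (cur ++ [c]) best
        _ = _ := by
            simp only [List.map_cons, hg, PySem.Chars.split₀.go, hns,
              Bool.false_eq_true, if_false, List.reverse_append, List.reverse_cons]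
            simp

-- min-fold facts
lemma foldl_min_le_init (l : List Nat) : ∀ b : Nat, l.foldl min b ≤ b := by
  induction l with
  | nil => simp
  | cons x t ih => intro b; exact le_trans (ih (min b x)) (min_le_left _ _)

lemma foldl_min_le_mem (l : List Nat) : ∀ (b x : Nat), x ∈ l → l.foldl min b ≤ x := by
  induction l with
  | nil => intro b x hx; simp at hx
  | cons y t ih =>
    intro b x hx
    rcases List.mem_cons.mp hx with rfl | hx
    · exact le_trans (foldl_min_le_init t _) (min_le_right _ _)
    · exact ih _ x hx

lemma le_foldl_min (l : List Nat) : ∀ (b c : Nat), c ≤ b → (∀ x ∈ l, c ≤ x) → c ≤ l.foldl min b := by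
  induction l with
  | nil => intro b c hb _; simpa using hb
  | cons y t ih =>
    intro b c hb h
    exact ih _ c (le_min hb (h y (by simp))) (fun x hx => h x (List.mem_cons_of_mem _ hx))

-- rank facts
lemma rankOf_zero_iff (s : String) : rankOf s = 0 ↔ s ∈ entKeyList := by
  unfold rankOf; split_ifs <;> first | simp_all | omega

lemma one_le_rankOf (s : String) (h : s ∉ entKeyList) : 1 ≤ rankOf s := by
  unfold rankOf; split_ifs <;> first | simp_all | omega

lemma rankOf_le_one_of_transit (s : String) (h : s ∈ transitKeyList) : rankOf s ≤ 1 := by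
  unfold rankOf; split_ifs <;> first | simp_all | omega

lemma two_le_rankOf (s : String) (h1 : s ∉ entKeyList) (h2 : s ∉ transitKeyList) : 2 ≤ rankOf s := by
  unfold rankOf; split_ifs <;> first | simp_all | omega

lemma rankOf_le_two_of_content (s : String) (h : s ∈ contentKeyList) : rankOf s ≤ 2 := by
  unfold rankOf; split_ifs <;> first | simp_all | omega

lemma rankOf_eq_three (s : String) (h1 : s ∉ entKeyList) (h2 : s ∉ transitKeyList)
    (h3 : s ∉ contentKeyList) : rankOf s = 3 := by
  unfold rankOf; split_ifs <;> first | simp_all | omega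

-- A's nonempty-intersection test is an existence over the raw token list (no keyword is empty)
lemma inter_ne_nil_iff (toks L : List String) (hL : "" ∉ L) :
    (PySem.Set.inter (PySem.Set.ofList (toks.filter (fun p => p ≠ ""))) (PySem.Set.ofList L) ≠ []) ↔
      ∃ x ∈ toks, x ∈ L := by
  rw [ne_eq, List.eq_nil_iff_forall_not_mem]
  push_neg
  simp only [PySem.Set.mem_inter, PySem.Set.mem_ofList, List.mem_filter, decide_eq_true_eq]
  constructor
  · rintro ⟨x, ⟨hx, _⟩, hxL⟩; exact ⟨x, hx, hxL⟩
  · rintro ⟨x, hx, hxL⟩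
    exact ⟨x, ⟨hx, by rintro rfl; exact hL hxL⟩, hxL⟩

-- existence of a keyword token on the Str side ↔ on the Chars side (via the split₀ bridge)
lemma exists_tok_iff (key : String) (L : List String) :
    (∃ x ∈ PySem.Str.split₀ key, x ∈ L)
      ↔ ∃ t ∈ PySem.Chars.split₀ key.toList, String.ofList t ∈ L := by
  rw [← PySem.Str.split₀_map_toList]
  constructor
  · rintro ⟨x, hx, hxL⟩
    exact ⟨x.toList, List.mem_map_of_mem hx, by rwa [String.ofList_toList]⟩
  · rintro ⟨t, ht, htL⟩
    obtain ⟨x, hx, hxt⟩ := List.mem_map.mp ht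
    refine ⟨x, hx, ?_⟩
    rw [← hxt] at htL
    rwa [String.ofList_toList] at htL
    
-- the whole token phase: A's three intersection tests agree with B's min-rank scan
lemma token_phase_eq (n : String) :
    (if PySem.Set.inter (PySem.Set.ofList ((PySem.Str.split₀ (PySem.Str.replace (PySem.Str.replace (PySem.Str.replace (PySem.Str.replace n "-" " ") "_" " ") "/" " ") "\\" " ")).filter (fun p => p ≠ ""))) (PySem.Set.ofList entKeyList) ≠ [] then "Enterprise"
     else if PySem.Set.inter (PySem.Set.ofList ((PySem.Str.split₀ (PySem.Str.replace (PySem.Str.replace (PySem.Str.replace (PySem.Str.replace n "-" " ") "_" " ") "/" " ") "\\" " ")).filter (fun p => p ≠ ""))) (PySem.Set.ofList transitKeyList) ≠ [] then "Transit / Access"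
     else if PySem.Set.inter (PySem.Set.ofList ((PySem.Str.split₀ (PySem.Str.replace (PySem.Str.replace (PySem.Str.replace (PySem.Str.replace n "-" " ") "_" " ") "/" " ") "\\" " ")).filter (fun p => p ≠ ""))) (PySem.Set.ofList contentKeyList) ≠ [] then "Content"
     else "")
    =
    (if ((n.toList ++ [' ']).foldl stepB (3, [])).1 = 3 then ""
     else ["Enterprise", "Transit / Access", "Content"].getD ((n.toList ++ [' ']).foldl stepB (3, [])).1 "") := by
  set key := PySem.Str.replace (PySem.Str.replace (PySem.Str.replace (PySem.Str.replace n "-" " ") "_" " ") "/" " ") "\\" " " with hkey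
  have htoks : PySem.Chars.split₀ (n.toList.map g4) = PySem.Chars.split₀ key.toList := by
    rw [hkey, norm4_toList]
  have hbest : ((n.toList ++ [' ']).foldl stepB (3, [])).1
      = ((PySem.Chars.split₀ key.toList).map (fun t => rankOf (String.ofList t))).foldl min 3 := by
    have h := scan_inv n.toList [] 3
    simp only [List.reverse_nil] at h
    rw [h, show PySem.Chars.split₀.go (n.toList.map g4) [] [] =
        PySem.Chars.split₀ (n.toList.map g4) from rfl, htoks, List.foldl_map]
  have hiE := inter_ne_nil_iff (PySem.Str.split₀ key) entKeyList (by decide)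
  have hiT := inter_ne_nil_iff (PySem.Str.split₀ key) transitKeyList (by decide)
  have hiC := inter_ne_nil_iff (PySem.Str.split₀ key) contentKeyList (by decide)
  set R := (PySem.Chars.split₀ key.toList).map (fun t => rankOf (String.ofList t)) with hR
  by_cases he : ∃ x ∈ PySem.Str.split₀ key, x ∈ entKeyList
  · have hb : R.foldl min 3 = 0 := by
      obtain ⟨t, ht, htL⟩ := (exists_tok_iff key entKeyList).mp he
      have h0 : (0 : Nat) ∈ R := by
        rw [hR]
        exact List.mem_map.mpr ⟨t, ht, (rankOf_zero_iff _).mpr htL⟩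
      exact Nat.le_zero.mp (foldl_min_le_mem R 3 0 h0)
    rw [hbest, hb]
    exact Eq.trans (if_pos (hiE.mpr he)) (by decide)
  · have hE0 : ¬ (PySem.Set.inter (PySem.Set.ofList ((PySem.Str.split₀ key).filter (fun p => p ≠ ""))) (PySem.Set.ofList entKeyList) ≠ []) :=
      fun hne => he (hiE.mp hne)
    have hge1 : ∀ x ∈ R, 1 ≤ x := by
      intro x hx
      obtain ⟨t, ht, rfl⟩ := List.mem_map.mp hx
      refine one_le_rankOf _ (fun hmem => he ?_)
      exact (exists_tok_iff key entKeyList).mpr ⟨t, ht, hmem⟩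
    by_cases htr : ∃ x ∈ PySem.Str.split₀ key, x ∈ transitKeyList
    · have hb : R.foldl min 3 = 1 := by
        obtain ⟨t, ht, htL⟩ := (exists_tok_iff key transitKeyList).mp htr
        have hle : R.foldl min 3 ≤ 1 := by
          refine le_trans (foldl_min_le_mem R 3 _ ?_) (rankOf_le_one_of_transit _ htL)
          exact List.mem_map.mpr ⟨t, ht, rfl⟩
        have hge : 1 ≤ R.foldl min 3 := le_foldl_min R 3 1 (by omega) hge1
        omega
      rw [hbest, hb]
      exact Eq.trans (if_neg hE0) (Eq.trans (if_pos (hiT.mpr htr)) (by decide))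
    · have hT0 : ¬ (PySem.Set.inter (PySem.Set.ofList ((PySem.Str.split₀ key).filter (fun p => p ≠ ""))) (PySem.Set.ofList transitKeyList) ≠ []) :=
        fun hne => htr (hiT.mp hne)
      have hge2 : ∀ x ∈ R, 2 ≤ x := by
        intro x hx
        obtain ⟨t, ht, rfl⟩ := List.mem_map.mp hx
        refine two_le_rankOf _ (fun hmem => he ?_) (fun hmem => htr ?_)
        · exact (exists_tok_iff key entKeyList).mpr ⟨t, ht, hmem⟩
        · exact (exists_tok_iff key transitKeyList).mpr ⟨t, ht, hmem⟩
      by_cases hco : ∃ x ∈ PySem.Str.split₀ key, x ∈ contentKeyList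
      · have hb : R.foldl min 3 = 2 := by
          obtain ⟨t, ht, htL⟩ := (exists_tok_iff key contentKeyList).mp hco
          have hle : R.foldl min 3 ≤ 2 := by
            refine le_trans (foldl_min_le_mem R 3 _ ?_) (rankOf_le_two_of_content _ htL)
            exact List.mem_map.mpr ⟨t, ht, rfl⟩
          have hge : 2 ≤ R.foldl min 3 := le_foldl_min R 3 2 (by omega) hge2
          omega
        rw [hbest, hb]
        exact Eq.trans (if_neg hE0) (Eq.trans (if_neg hT0) (Eq.trans (if_pos (hiC.mpr hco)) (by decide)))
      · have hC0 : ¬ (PySem.Set.inter (PySem.Set.ofList ((PySem.Str.split₀ key).filter (fun p => p ≠ ""))) (PySem.Set.ofList contentKeyList) ≠ []) :=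
          fun hne => hco (hiC.mp hne)
        have hb : R.foldl min 3 = 3 := by
          have hge : 3 ≤ R.foldl min 3 := by
            refine le_foldl_min R 3 3 le_rfl ?_
            intro x hx
            obtain ⟨t, ht, rfl⟩ := List.mem_map.mp hx
            refine le_of_eq (rankOf_eq_three _ (fun hmem => he ?_) (fun hmem => htr ?_)
              (fun hmem => hco ?_)).symm
            · exact (exists_tok_iff key entKeyList).mpr ⟨t, ht, hmem⟩
            · exact (exists_tok_iff key transitKeyList).mpr ⟨t, ht, hmem⟩
            · exact (exists_tok_iff key contentKeyList).mpr ⟨t, ht, hmem⟩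
          have hle := foldl_min_le_init R 3
          omega
        rw [hbest, hb]
        exact Eq.trans (if_neg hE0) (Eq.trans (if_neg hT0) (Eq.trans (if_neg hC0) (by decide)))

-- the phrase tests agree: A's four stripped-equality checks = B's membership of the stripped map
lemma phrase_iff (n : String) :
    (PySem.Str.strip (String.ofList (n.toList.map (fun c => if c = '-' ∨ c = '_' ∨ c = '/' then ' ' else c))) ∈ phraseList)
      ↔ (PySem.Str.strip (PySem.Str.replace (PySem.Str.replace (PySem.Str.replace n "-" " ") "_" " ") "/" " ") = "network services"
        ∨ PySem.Str.strip (PySem.Str.replace (PySem.Str.replace (PySem.Str.replace n "-" " ") "_" " ") "/" " ") = "non profit"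
        ∨ PySem.Str.strip (PySem.Str.replace (PySem.Str.replace (PySem.Str.replace n "-" " ") "_" " ") "/" " ") = "route server"
        ∨ PySem.Str.strip (PySem.Str.replace (PySem.Str.replace (PySem.Str.replace n "-" " ") "_" " ") "/" " ") = "route collector") := by
  have hsame : PySem.Str.strip (String.ofList (n.toList.map (fun c => if c = '-' ∨ c = '_' ∨ c = '/' then ' ' else c)))
      = PySem.Str.strip (PySem.Str.replace (PySem.Str.replace (PySem.Str.replace n "-" " ") "_" " ") "/" " ") := by
    apply String.toList_inj.mp
    rw [PySem.Str.toList_strip, PySem.Str.toList_strip, norm3_toList, String.toList_ofList]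
    rfl
  rw [hsame]
  simp [phraseList]

-- ===== VERDICT (by name: the statement is the Claim_ definition above) =====
theorem map_as_class_spec : Claim_equal_map_as_class := by
  intro as_type _ _
  show map_as_class as_type = map_as_class_alt as_type
  unfold map_as_class map_as_class_alt
  set n := PySem.Str.lower (PySem.Str.strip as_type) with hn
  by_cases hph : PySem.Str.strip (String.ofList (n.toList.map (fun c => if c = '-' ∨ c = '_' ∨ c = '/' then ' ' else c))) ∈ phraseList
  · rcases (phrase_iff n).mp hph with h | h | h | h <;> simp [h, hph]
  · have h4 := (phrase_iff n).not.mp hph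
    push_neg at h4
    obtain ⟨h1, h2, h3, h4'⟩ := h4
    simp only [h1, h2, h3, h4', hph, if_false, Bool.false_eq_true]
    exact token_phase_eq n
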